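-- pv_equiv track=rewrite | github.com/Melodiz/CodeRun | CodeRun_Boost/7268_choose_primes/solution.py | solution
-- ===== SOURCE A (Python) =====
-- def solution(n: int) -> int:
--     if n < 5:
--         return 0
--
--     is_prime = [True] * (n + 1)
--     is_prime[0] = is_prime[1] = False
--     for i in range(2, int(n**0.5) + 1):
--         if is_prime[i]:
--             # Mark all multiples of i as not prime.
--             for multiple in range(i * i, n + 1, i):
--                 is_prime[multiple] = False
--
--     count1_mod4 = 0
--     count3_mod4 = 0
--     for p in range(3, n + 1):
--         if is_prime[p]:
--             if p % 4 == 1: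
--                 count1_mod4 += 1
--             elif p % 4 == 3:
--                 count3_mod4 += 1
--     return count1_mod4 * count3_mod4
-- ===== SOURCE B (Python) =====
-- def solution(n: int) -> int:
--     def is_prime(p: int) -> bool:
--         if p < 2:
--             return False
--         d = 2
--         while d * d <= p:
--             if p % d == 0:
--                 return False
--             d += 1
--         return True
--
--     count1 = 0
--     count3 = 0
--     for p in range(3, n + 1):
--         if is_prime(p):
--             if p % 4 == 1:
--                 count1 += 1
--             elif p % 4 == 3:
--                 count3 += 1
--     return count1 * count3
-- ===== Notes on version B (the rewrite author's own statement) =====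
-- stated objective: alternative
-- what changed: Replaces the Eratosthenes sieve array (and the n<5 early return) with a direct trial-division primality test per candidate in one counting loop; no O(n) boolean array is built.
import Mathlib
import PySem

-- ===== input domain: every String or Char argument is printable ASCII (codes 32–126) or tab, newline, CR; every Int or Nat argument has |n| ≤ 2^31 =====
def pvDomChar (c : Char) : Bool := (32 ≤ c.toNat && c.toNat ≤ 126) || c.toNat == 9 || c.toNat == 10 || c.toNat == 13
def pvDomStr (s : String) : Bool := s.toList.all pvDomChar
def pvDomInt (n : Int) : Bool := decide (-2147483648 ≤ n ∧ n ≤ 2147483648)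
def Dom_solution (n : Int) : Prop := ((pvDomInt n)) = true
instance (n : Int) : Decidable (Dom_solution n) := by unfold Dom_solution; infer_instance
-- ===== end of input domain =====

-- B replaces the sieve array by a per-candidate trial-division primality test (alternative decomposition, not faster).

-- ===== PORT A =====
-- `int(n**0.5)` is ported as `Nat.sqrt`: for 5 ≤ n ≤ 2^31 the double sqrt is accurate enough
-- that `int(n**0.5) = isqrt(n)` exactly, so this is exact on the stated domain.
def solution (n : Int) : Int :=
  if n < 5 then 0
  else
    let r : Int := (Nat.sqrt n.toNat : Int)
    let isp0 : List Bool := List.replicate (n + 1).toNat true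
    let isp1 : List Bool := PySem.List.pySetD (PySem.List.pySetD isp0 0 false) 1 false
    let isp : List Bool :=
      (PySem.List.pyRange 2 (r + 1) 1).foldl
        (fun a i =>
          if PySem.List.pyGetD a i false then
            (PySem.List.pyRange (i * i) (n + 1) i).foldl
              (fun a m => PySem.List.pySetD a m false) a
          else a) isp1
    let c : Int × Int :=
      (PySem.List.pyRange 3 (n + 1) 1).foldl
        (fun (c : Int × Int) p =>
          if PySem.List.pyGetD isp p false then
            if PySem.Int.mod p 4 == 1 then (c.1 + 1, c.2)
            else if PySem.Int.mod p 4 == 3 then (c.1, c.2 + 1)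
            else c
          else c) (0, 0)
    c.1 * c.2

-- ===== PORT B =====
-- the `while d * d <= p` loop of Source B's is_prime
def trialDiv (p d : Int) : Bool :=
  if h : d * d ≤ p then
    if PySem.Int.mod p d == 0 then false
    else trialDiv p (d + 1)
  else true
termination_by (p + 1 - d).toNat
decreasing_by
  have hdp : d ≤ p := by
    by_cases h0 : d ≤ 0
    · nlinarith [mul_self_nonneg d]
    · nlinarith [mul_self_nonneg (d - 1)]
  omega

def isPrimeB (p : Int) : Bool := if p < 2 then false else trialDiv p 2

def solution_alt (n : Int) : Int :=
  let c : Int × Int :=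
    (PySem.List.pyRange 3 (n + 1) 1).foldl
      (fun (c : Int × Int) p =>
        if isPrimeB p then
          if PySem.Int.mod p 4 == 1 then (c.1 + 1, c.2)
          else if PySem.Int.mod p 4 == 3 then (c.1, c.2 + 1)
          else c
        else c) (0, 0)
  c.1 * c.2

-- ===== PRECONDITION & SPEC =====
def Spec_solution (n : Int) (out : Int) : Prop := out = solution_alt n
instance (n : Int) (out : Int) : Decidable (Spec_solution n out) := by unfold Spec_solution; infer_instance

-- ===== CLAIM (what is proved, stated in full; the proofs are below) =====
def Claim_equal_solution : Prop := ∀ (n : Int), Dom_solution n → Spec_solution n (solution n)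

-- ===== LEMMAS AND PROOFS =====

-- "p has no divisor q with 2 ≤ q and q*q ≤ p"
def NoSmallDiv (p : Int) : Prop := ∀ q : Int, 2 ≤ q → q * q ≤ p → ¬ q ∣ p

-- characterisation of B's while loop (for the nonnegative starts it is called with)
theorem trialDiv_eq (p : Int) : ∀ d : Int, 0 ≤ d →
    (trialDiv p d = true ↔ ∀ q : Int, d ≤ q → q * q ≤ p → ¬ q ∣ p) := by
  intro d
  induction d using trialDiv.induct p with
  | case1 x hx hmod =>
    intro _
    rw [trialDiv, dif_pos hx, if_pos hmod]
    simp only [Bool.false_eq_true, false_iff]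
    intro hall
    exact hall x le_rfl hx ((PySem.Int.mod_eq_zero_iff_dvd p x).mp (by simpa using hmod))
  | case2 x hx hmod ih =>
    intro hx0
    rw [trialDiv, dif_pos hx, if_neg hmod]
    rw [ih (by omega)]
    constructor
    · intro hall q hq hqq hd
      by_cases hqx : x = q
      · subst hqx
        exact hmod (by simpa using (PySem.Int.mod_eq_zero_iff_dvd p x).mpr hd)
      · exact hall q (by omega) hqq hd
    · intro hall q hq hqq hd
      exact hall q (by omega) hqq hd
  | case3 x hx =>
    intro hx0
    rw [trialDiv, dif_neg hx]
    simp only [true_iff]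
    intro q hq hqq hd
    exact hx (by nlinarith)

theorem isPrimeB_iff (p : Int) (hp : 2 ≤ p) :
    (isPrimeB p = true ↔ NoSmallDiv p) := by
  rw [isPrimeB, if_neg (by omega), trialDiv_eq p 2 (by omega)]
  rfl

theorem isPrimeB_three : isPrimeB 3 = true := by
  rw [isPrimeB, if_neg (by norm_num), trialDiv]
  norm_num

theorem isPrimeB_four : isPrimeB 4 = false := by
  rw [isPrimeB, if_neg (by norm_num), trialDiv]
  norm_num [PySem.Int.mod_eq_emod_of_pos]

-- invariant of A's outer sieve loop, after outer indices < i have been processed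
def SieveInv (n i : Int) (a : List Bool) : Prop :=
  a.length = (n + 1).toNat ∧
  ∀ m : Int, 0 ≤ m → m ≤ n →
    (PySem.List.pyGetD a m false = true ↔
      (2 ≤ m ∧ ∀ q : Int, 2 ≤ q → q < i → q * q ≤ m → ¬ q ∣ m))

theorem length_markFold (ms : List Int) : ∀ (a : List Bool),
    (ms.foldl (fun a m => PySem.List.pySetD a m false) a).length = a.length := by
  induction ms with
  | nil => intro a; rfl
  | cons m ms ih => intro a; simp [ih, PySem.List.length_pySetD]

theorem getD_markFold (ms : List Int) : ∀ (a : List Bool) (j : Int),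
    0 ≤ j → j < (a.length : Int) → (∀ m ∈ ms, 0 ≤ m) →
    PySem.List.pyGetD (ms.foldl (fun a m => PySem.List.pySetD a m false) a) j false =
      if j ∈ ms then false else PySem.List.pyGetD a j false := by
  induction ms with
  | nil => intro a j _ _ _; simp
  | cons m ms ih =>
    intro a j hj0 hjl hms
    have hm0 : 0 ≤ m := hms m (by simp)
    simp only [List.foldl_cons]
    rw [ih (PySem.List.pySetD a m false) j hj0
        (by rw [PySem.List.length_pySetD]; exact hjl)
        (fun x hx => hms x (by simp [hx]))]
    by_cases hjm : j ∈ ms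
    · simp [hjm]
    · rw [if_neg hjm]
      by_cases hem : j = m
      · rw [if_pos (by simp [hem])]
        rw [PySem.List.pySetD_of_nonneg _ _ hm0, PySem.List.pyGetD_of_nonneg _ _ hj0]
        have hlt : j.toNat < a.length := by omega
        have heq : m.toNat = j.toNat := by omega
        simp [List.getD_eq_getElem?_getD, heq, hlt]
      · rw [if_neg (by simp [hem, hjm])]
        rw [PySem.List.pySetD_of_nonneg _ _ hm0,
            PySem.List.pyGetD_of_nonneg _ _ hj0, PySem.List.pyGetD_of_nonneg _ _ hj0]
        have hne : m.toNat ≠ j.toNat := by omega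
        simp [List.getD_eq_getElem?_getD, hne]

theorem mem_markRange (n i j : Int) (h2 : 2 ≤ i) :
    j ∈ PySem.List.pyRange (i * i) (n + 1) i ↔ i * i ≤ j ∧ j ≤ n ∧ i ∣ j := by
  rw [PySem.List.mem_pyRange_iff_of_pos (by omega)]
  constructor
  · rintro ⟨h1, h2', h3⟩
    refine ⟨h1, by omega, ?_⟩
    have := dvd_add h3 (dvd_mul_right i i)
    simpa using this
  · rintro ⟨h1, h2', h3⟩
    exact ⟨h1, by omega, dvd_sub h3 (dvd_mul_right i i)⟩

theorem sieve_step (n i : Int) (hn : 5 ≤ n) (h2 : 2 ≤ i) (hin : i ≤ n) (a : List Bool)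
    (ha : SieveInv n i a) :
    SieveInv n (i + 1)
      (if PySem.List.pyGetD a i false then
        (PySem.List.pyRange (i * i) (n + 1) i).foldl (fun a m => PySem.List.pySetD a m false) a
      else a) := by
  obtain ⟨hlen, hval⟩ := ha
  by_cases hguard : PySem.List.pyGetD a i false = true
  · rw [if_pos hguard]
    refine ⟨by rw [length_markFold, hlen], ?_⟩
    intro m hm0 hmn
    rw [getD_markFold _ a m hm0 (by omega)
        (fun x hx => by
          rw [mem_markRange n i x h2] at hx
          nlinarith [hx.1])]
    simp only [mem_markRange n i m h2]
    by_cases hc : i * i ≤ m ∧ m ≤ n ∧ i ∣ m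
    · rw [if_pos hc]
      simp only [Bool.false_eq_true, false_iff]
      rintro ⟨hm2, hall⟩
      exact hall i h2 (by omega) hc.1 hc.2.2
    · rw [if_neg hc, hval m hm0 hmn]
      constructor
      · rintro ⟨hm2, hall⟩
        refine ⟨hm2, fun q hq2 hqlt hqq hdvd => ?_⟩
        by_cases hqi : q < i
        · exact hall q hq2 hqi hqq hdvd
        · have hqe : q = i := by omega
          subst hqe
          exact hc ⟨hqq, hmn, hdvd⟩
      · rintro ⟨hm2, hall⟩
        exact ⟨hm2, fun q hq2 hqlt hqq hdvd => hall q hq2 (by omega) hqq hdvd⟩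
  · rw [if_neg hguard]
    refine ⟨hlen, ?_⟩
    have hbad : ¬(2 ≤ i ∧ ∀ q : Int, 2 ≤ q → q < i → q * q ≤ i → ¬ q ∣ i) := by
      intro hcontra
      exact hguard ((hval i (by omega) hin).mpr hcontra)
    have hex : ∃ q0 : Int, 2 ≤ q0 ∧ q0 < i ∧ q0 * q0 ≤ i ∧ q0 ∣ i := by
      by_contra hno
      exact hbad ⟨h2, fun q hq2 hqlt hqq hdvd => hno ⟨q, hq2, hqlt, hqq, hdvd⟩⟩
    obtain ⟨q0, hq02, hq0lt, hq0sq, hq0dvd⟩ := hex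
    intro m hm0 hmn
    rw [hval m hm0 hmn]
    constructor
    · rintro ⟨hm2, hall⟩
      refine ⟨hm2, fun q hq2 hqlt hqq hdvd => ?_⟩
      by_cases hqi : q < i
      · exact hall q hq2 hqi hqq hdvd
      · have hqe : q = i := by omega
        subst hqe
        have hii : q ≤ q * q := by nlinarith
        exact hall q0 hq02 hq0lt (by omega) (dvd_trans hq0dvd hdvd)
    · rintro ⟨hm2, hall⟩
      exact ⟨hm2, fun q hq2 hqlt hqq hdvd => hall q hq2 (by omega) hqq hdvd⟩

theorem sieve_fold (n r : Int) (hn : 5 ≤ n) (hr : r ≤ n) : ∀ (k : Nat) (i : Int) (a : List Bool),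
    (r + 1 - i).toNat = k → 2 ≤ i → i ≤ r + 1 → SieveInv n i a →
    SieveInv n (r + 1)
      ((PySem.List.pyRange i (r + 1) 1).foldl
        (fun a i =>
          if PySem.List.pyGetD a i false then
            (PySem.List.pyRange (i * i) (n + 1) i).foldl
              (fun a m => PySem.List.pySetD a m false) a
          else a) a) := by
  intro k
  induction k with
  | zero =>
    intro i a hk h2 hle hinv
    have : i = r + 1 := by omega
    subst this
    rw [PySem.List.pyRange_one_eq_nil le_rfl]
    exact hinv
  | succ k ih =>
    intro i a hk h2 hle hinv
    have hlt : i < r + 1 := by omega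
    rw [PySem.List.pyRange_one_cons hlt, List.foldl_cons]
    exact ih (i + 1) _ (by omega) (by omega) (by omega)
      (sieve_step n i hn h2 (by omega) a hinv)

theorem sieve_init (n : Int) (hn : 5 ≤ n) :
    SieveInv n 2
      (PySem.List.pySetD (PySem.List.pySetD (List.replicate (n + 1).toNat true) 0 false) 1 false) := by
  refine ⟨by simp [PySem.List.length_pySetD], ?_⟩
  intro m hm0 hmn
  rw [PySem.List.pySetD_of_nonneg _ _ (by omega : (0:Int) ≤ 1),
      PySem.List.pySetD_of_nonneg _ _ (by omega : (0:Int) ≤ 0),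
      PySem.List.pyGetD_of_nonneg _ _ hm0]
  have hlen : ((List.replicate (n + 1).toNat true).set (0:Int).toNat false).length = (n + 1).toNat := by
    simp
  by_cases hm01 : m = 0 ∨ m = 1
  · have h0l : (0:Nat) < (n + 1).toNat := by omega
    have h1l : (1:Nat) < (n + 1).toNat := by omega
    rcases hm01 with h | h <;> subst h <;>
      simp [List.getD_eq_getElem?_getD, h0l, h1l]
  · have h2m : 2 ≤ m := by omega
    have hne1 : (1:Int).toNat ≠ m.toNat := by omega
    have hne0 : (0:Int).toNat ≠ m.toNat := by omega
    have hltm : m.toNat < (n + 1).toNat := by omega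
    simp only [List.getD_eq_getElem?_getD, List.getElem?_set, if_neg hne1, if_neg hne0,
      List.getElem?_replicate, if_pos hltm]
    simp only [Option.getD_some, true_iff]
    exact ⟨h2m, fun q hq2 hqlt _ _ => by omega⟩

theorem sieve_correct (n : Int) (hn : 5 ≤ n) (p : Int) (hp3 : 3 ≤ p) (hpn : p ≤ n) :
    (PySem.List.pyGetD
      ((PySem.List.pyRange 2 ((Nat.sqrt n.toNat : Int) + 1) 1).foldl
        (fun a i =>
          if PySem.List.pyGetD a i false then
            (PySem.List.pyRange (i * i) (n + 1) i).foldl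
              (fun a m => PySem.List.pySetD a m false) a
          else a)
        (PySem.List.pySetD (PySem.List.pySetD (List.replicate (n + 1).toNat true) 0 false) 1 false))
      p false = true ↔ NoSmallDiv p) := by
  have hrn : (Nat.sqrt n.toNat : Int) ≤ n := by
    have := Nat.sqrt_le_self n.toNat
    omega
  have hs : 1 ≤ Nat.sqrt n.toNat := Nat.le_sqrt.mpr (by omega)
  have hfin := sieve_fold n (Nat.sqrt n.toNat : Int) hn hrn
      ((Nat.sqrt n.toNat : Int) + 1 - 2).toNat 2 _ rfl le_rfl (by omega) (sieve_init n hn)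
  obtain ⟨hlen, hval⟩ := hfin
  rw [hval p (by omega) hpn]
  constructor
  · rintro ⟨-, hall⟩
    intro q hq2 hqq hdvd
    have hq0 : (0:Int) ≤ q := by omega
    have h1 : q.toNat * q.toNat ≤ n.toNat := by
      have hqn : q * q ≤ n := le_trans hqq hpn
      have e1 : (q.toNat : Int) = q := Int.toNat_of_nonneg hq0
      have e2 : (n.toNat : Int) = n := Int.toNat_of_nonneg (by omega)
      have hcast : ((q.toNat * q.toNat : Nat) : Int) ≤ ((n.toNat : Nat) : Int) := by
        push_cast [e1, e2]
        nlinarith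
      exact_mod_cast hcast
    have hle := Nat.le_sqrt.mpr h1
    exact hall q hq2 (by omega) hqq hdvd
  · intro hns
    exact ⟨by omega, fun q hq2 _ hqq hdvd => hns q hq2 hqq hdvd⟩

theorem solution_alt_small (n : Int) (hn : n < 5) : solution_alt n = 0 := by
  by_cases h2 : n ≤ 2
  · simp [solution_alt, PySem.List.pyRange_one_eq_nil (show n + 1 ≤ 3 by omega)]
  · have hm34 : PySem.Int.mod 3 4 = 3 := by
      rw [PySem.Int.mod_eq_emod_of_pos (by norm_num)]; decide
    have h34 : n = 3 ∨ n = 4 := by omega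
    rcases h34 with h | h <;> subst h
    · have hr : PySem.List.pyRange 3 (3 + 1) 1 = [3] := PySem.List.pyRange_one_singleton 3
      simp only [solution_alt, hr, List.foldl_cons, List.foldl_nil, isPrimeB_three, hm34]
      decide
    · have hr : PySem.List.pyRange 3 (4 + 1) 1 = [3, 4] := by
        rw [PySem.List.pyRange_one_cons (by norm_num)]
        rw [show (3:Int) + 1 = 4 by norm_num]
        rw [show (4:Int) + 1 = 4 + 1 from rfl, PySem.List.pyRange_one_singleton 4]
      simp only [solution_alt, hr, List.foldl_cons, List.foldl_nil, isPrimeB_three,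
        isPrimeB_four, hm34]
      decide

-- ===== VERDICT (by name: the statement is the Claim_ definition above) =====
theorem solution_spec : Claim_equal_solution := by
  intro n _
  show solution n = solution_alt n
  by_cases hn : n < 5
  · rw [solution, if_pos hn, solution_alt_small n hn]
  · have hn5 : 5 ≤ n := by omega
    simp only [solution, solution_alt, if_neg hn]
    rw [PySem.List.foldl_congr_mem (PySem.List.pyRange 3 (n + 1) 1) _
      (fun (c : Int × Int) p =>
        if isPrimeB p then
          if PySem.Int.mod p 4 == 1 then (c.1 + 1, c.2)
          else if PySem.Int.mod p 4 == 3 then (c.1, c.2 + 1)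
          else c
        else c) (0, 0)
      (by
        intro acc p hp
        rw [PySem.List.mem_pyRange_one] at hp
        have hlook :
            PySem.List.pyGetD
              ((PySem.List.pyRange 2 ((Nat.sqrt n.toNat : Int) + 1) 1).foldl
                (fun a i =>
                  if PySem.List.pyGetD a i false then
                    (PySem.List.pyRange (i * i) (n + 1) i).foldl
                      (fun a m => PySem.List.pySetD a m false) a
                  else a)
                (PySem.List.pySetD (PySem.List.pySetD (List.replicate (n + 1).toNat true) 0 false) 1 false))
              p false = isPrimeB p := by
          rw [Bool.eq_iff_iff, sieve_correct n hn5 p (by omega) (by omega),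
            isPrimeB_iff p (by omega)]
        rw [hlook])]
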